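-- pv_equiv track=rewrite | github.com/AP-MI-2021/lab-3-DorotheaFurdui | main.py | get_longest_all_even
-- ===== SOURCE A (Python) =====
-- def get_longest_all_even(lst):
--     '''
--     10.Toate numerele sunt pare.
--     :param lst: lista de numere intregi
--     :return: rez ce reprezinta cea mai lunga subsecventa in care toate numerele sunt pare
--     '''
--
--     rez = []
--     temp = []
--     for x in lst:
--         if x % 2 == 0:
--             temp.append(x)
--         else:
--             if (len(temp)>len(rez)):
--                 rez = temp[:]
--             temp.clear()
--     if (len(temp) > len(rez)):
--         rez = temp[:]
--     return rez
-- ===== SOURCE B (Python) =====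
-- def get_longest_all_even(lst):
--     # Build the maximal all-even runs first, then select the longest
--     # (max with key=len keeps the first longest, i.e. the earliest run).
--     n = len(lst)
--     runs = []
--     i = 0
--     while i < n:
--         if lst[i] % 2 == 0:
--             j = i
--             while j < n and lst[j] % 2 == 0:
--                 j += 1
--             runs.append(lst[i:j])
--             i = j
--         else:
--             i += 1
--     return max(runs, key=len, default=[])
-- ===== Notes on version B (the rewrite author's own statement) =====
-- stated objective: alternative
-- what changed: Replaces A's single-pass temp/rez accumulator with a build-all-even-runs-then-select-the-longest decomposition (max with key=len, first longest on ties).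
import Mathlib
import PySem

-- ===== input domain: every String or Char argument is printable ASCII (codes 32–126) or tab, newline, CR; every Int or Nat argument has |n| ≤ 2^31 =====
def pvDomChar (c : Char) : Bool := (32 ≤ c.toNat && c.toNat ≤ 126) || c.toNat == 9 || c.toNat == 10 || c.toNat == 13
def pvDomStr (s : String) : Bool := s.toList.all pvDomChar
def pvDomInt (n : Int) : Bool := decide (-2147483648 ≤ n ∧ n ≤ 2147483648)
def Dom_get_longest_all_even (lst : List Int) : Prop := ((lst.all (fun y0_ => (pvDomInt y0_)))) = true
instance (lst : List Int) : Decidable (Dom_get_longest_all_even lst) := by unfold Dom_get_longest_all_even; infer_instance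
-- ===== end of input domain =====

-- B rebuilds the answer as "collect the maximal all-even runs, then pick the longest
-- (earliest on ties)" instead of A's incremental temp/rez accumulator; same cost, plainer shape.

-- Python's 'x % 2 == 0', shared verbatim by both sources
def pvEven (x : Int) : Bool := PySem.Int.mod x 2 == 0

-- ===== PORT A =====
-- the for-loop over lst with mutable state (rez, temp); temp.append(x) / temp.clear() /
-- rez = temp[:] become the corresponding pure state updates.
def get_longest_all_even (lst : List Int) : List Int :=
  let p := lst.foldl (fun (st : List Int × List Int) x =>
      if pvEven x then (st.1, st.2 ++ [x])
      else if st.2.length > st.1.length then (st.2, []) else (st.1, []))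
    ([], [])
  if p.2.length > p.1.length then p.2 else p.1

-- ===== PORT B =====
-- Source B's outer while-loop over index i, recast as structural recursion over the remaining
-- suffix lst[i:]: the inner j-scan producing lst[i:j] is takeWhile even, setting i = j is
-- dropWhile even, and 'i += 1' on an odd head is recursing on the tail.
def pvEvenRuns : List Int → List (List Int)
  | [] => []
  | x :: xs =>
    if pvEven x then
      (x :: xs.takeWhile pvEven) :: pvEvenRuns (xs.dropWhile pvEven)
    else pvEvenRuns xs
termination_by l => l.length
decreasing_by
  · have := List.length_dropWhile_le pvEven xs
    simp only [List.length_cons]; omega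
  · simp

-- max(runs, key=len, default=[])
def get_longest_all_even_alt (lst : List Int) : List Int :=
  (PySem.List.max? (pvEvenRuns lst) (fun r => r.length)).getD []

-- ===== PRECONDITION & SPEC =====
def Spec_get_longest_all_even (lst : List Int) (out : List Int) : Prop := out = get_longest_all_even_alt lst
instance (lst : List Int) (out : List Int) : Decidable (Spec_get_longest_all_even lst out) := by unfold Spec_get_longest_all_even; infer_instance

-- ===== CLAIM (what is proved, stated in full; the proofs are below) =====
def Claim_equal_get_longest_all_even : Prop := ∀ (lst : List Int), Dom_get_longest_all_even lst → Spec_get_longest_all_even lst (get_longest_all_even lst)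

-- ===== LEMMAS AND PROOFS =====

-- "keep the challenger only if strictly longer" — the selection step shared by both sides
def pvPick (b r : List Int) : List Int := if r.length > b.length then r else b

-- A's traversal, abstracted: the runs it closes off, given the pending run t and the rest of the input
def pvGlue : List Int → List Int → List (List Int)
  | t, [] => [t]
  | t, x :: xs => if pvEven x then pvGlue (t ++ [x]) xs else t :: pvGlue [] xs

theorem pvPick_nil (r : List Int) : pvPick [] r = r := by
  cases r <;> simp [pvPick]

-- A's fold, finished with the final pick, is the pvPick-fold over the glued runs
theorem pvA_glue (l : List Int) (rez temp : List Int) :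
    (let p := l.foldl (fun (st : List Int × List Int) x =>
        if pvEven x then (st.1, st.2 ++ [x])
        else if st.2.length > st.1.length then (st.2, []) else (st.1, []))
      (rez, temp);
     if p.2.length > p.1.length then p.2 else p.1)
    = (pvGlue temp l).foldl pvPick rez := by
  induction l generalizing rez temp with
  | nil => simp [pvGlue, pvPick]
  | cons x xs ih =>
    by_cases hx : pvEven x
    · simp only [List.foldl_cons, hx, if_pos, pvGlue]
      exact ih rez (temp ++ [x])
    · simp only [List.foldl_cons, hx, pvGlue, Bool.false_eq_true, if_false, List.foldl_cons]
      by_cases hlen : temp.length > rez.length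
      · simpa [hlen, pvPick] using ih temp []
      · simpa [hlen, pvPick] using ih rez []

-- prepending the takeWhile/dropWhile split of l does not change the pvPick-fold over pvEvenRuns l
theorem pvRuns_split (l : List Int) (r : List Int) :
    ((l.takeWhile pvEven) :: pvEvenRuns (l.dropWhile pvEven)).foldl pvPick r
    = (pvEvenRuns l).foldl pvPick r := by
  cases l with
  | nil => simp [pvEvenRuns, pvPick]
  | cons x xs =>
    by_cases hx : pvEven x
    · simp only [List.takeWhile_cons, List.dropWhile_cons, hx, if_pos, pvEvenRuns]
    · simp only [List.takeWhile_cons, List.dropWhile_cons, hx, Bool.false_eq_true, if_false,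
        pvEvenRuns, List.foldl_cons, pvPick_nil]
      rw [show pvPick r [] = r by simp [pvPick]]

-- the glued runs fold like (pending ++ first run) followed by the remaining runs
theorem pvGlue_runs (l : List Int) (t r : List Int) :
    (pvGlue t l).foldl pvPick r
    = ((t ++ l.takeWhile pvEven) :: pvEvenRuns (l.dropWhile pvEven)).foldl pvPick r := by
  induction l generalizing t r with
  | nil => simp [pvGlue, pvEvenRuns]
  | cons x xs ih =>
    by_cases hx : pvEven x
    · simp only [pvGlue, hx, if_pos, List.takeWhile_cons, List.dropWhile_cons]
      rw [ih (t ++ [x]) r]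
      simp [hx]
    · simp only [pvGlue, hx, Bool.false_eq_true, if_false, List.foldl_cons,
        List.takeWhile_cons, List.dropWhile_cons]
      rw [ih [] (pvPick r t)]
      simp only [List.nil_append]
      rw [pvRuns_split]
      simp only [hx, pvEvenRuns, Bool.false_eq_true, if_false, List.append_nil]

-- the pvPick-fold is Python's max(key=len) loop, run from an initial candidate
theorem pvFold_max_some (rs : List (List Int)) (b : List Int) :
    rs.foldl pvPick b
    = (rs.foldl (fun (acc : Option (List Int)) x =>
        match acc with
        | none => some x
        | some m => if m.length < x.length then some x else some m) (some b)).getD [] := by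
  induction rs generalizing b with
  | nil => simp
  | cons r rest ih =>
    have h2 : (match some b with
        | none => some r
        | some m => if m.length < r.length then some r else some m)
        = some (pvPick b r) := by
      by_cases h : b.length < r.length <;> simp [pvPick, h]
    rw [List.foldl_cons, List.foldl_cons, h2]
    exact ih (pvPick b r)

theorem pvFold_eq_max (rs : List (List Int)) :
    rs.foldl pvPick [] = (PySem.List.max? rs (fun r => r.length)).getD [] := by
  cases rs with
  | nil => rfl
  | cons r rest =>
    rw [List.foldl_cons, pvPick_nil, pvFold_max_some rest r]
    simp only [PySem.List.max?, List.foldl_cons]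
    congr 2
    funext acc x
    cases acc <;> simp

-- ===== VERDICT (by name: the statement is the Claim_ definition above) =====
theorem get_longest_all_even_spec : Claim_equal_get_longest_all_even := by
  intro lst _
  show get_longest_all_even lst = get_longest_all_even_alt lst
  unfold get_longest_all_even get_longest_all_even_alt
  rw [pvA_glue lst [] [], pvGlue_runs lst [] [], List.nil_append, pvRuns_split, pvFold_eq_max]
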